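-- pv_equiv track=rewrite | github.com/soumya-shome/My-Guide-to-Coding | Number Problems/adam and prime.py | adam
-- ===== SOURCE A (Python) =====
-- def adam(n):
--     n1=0 #OG reverse
--     n2=n #OG number
--     while (n!=0):
--         n1=n1*10+int(n%10)
--         n=n//10
--     s1=n2**2 #OG number square
--     s2=n1**2 #OG reverse square
--     s3=s2
--     b=0 #Reverse of OG reverse Square
--     while(s3!=0):
--         b=b*10 + int(s3%10)
--         s3=s3//10
--     if b==s1:
--         return True
--     else:
--         return False
-- ===== SOURCE B (Python) =====
-- def adam(n):
--     # Digit i of str(n) (most significant first) carries weight 10**i in the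
--     # reversed number, so the reverse is a positional power sum; the final
--     # reversal/comparison is done on the decimal strings directly.
--     s = str(n)
--     r = sum((ord(c) - 48) * 10 ** i for i, c in enumerate(s))
--     return str(r * r) == str(n * n)[::-1]
-- ===== Notes on version B (the rewrite author's own statement) =====
-- stated objective: alternative
-- what changed: A's two divmod Horner while-loops (accumulating r=10*r+digit) and integer comparison are replaced by computing the reversed number as a positional power-weighted sum over the decimal string (digit i gets weight 10**i) and comparing the decimal strings str(r*r) == str(n*n)[::-1], so no digit-accumulation loop and no second numeric reversal exist in B.
-- outside the precondition, e.g. on adam(-12): A does not finish within the time limit, B returns False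
import Mathlib
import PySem

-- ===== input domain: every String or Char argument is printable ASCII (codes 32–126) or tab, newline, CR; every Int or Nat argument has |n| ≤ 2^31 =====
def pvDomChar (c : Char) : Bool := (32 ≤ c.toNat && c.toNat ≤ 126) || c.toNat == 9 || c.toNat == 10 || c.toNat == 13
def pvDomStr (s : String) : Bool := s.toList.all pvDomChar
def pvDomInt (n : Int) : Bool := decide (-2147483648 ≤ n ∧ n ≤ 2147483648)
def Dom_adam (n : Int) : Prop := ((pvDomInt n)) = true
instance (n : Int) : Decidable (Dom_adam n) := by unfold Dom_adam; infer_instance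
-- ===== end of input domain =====

-- B replaces A's two divmod Horner while-loops and integer comparison by a positional
-- power-weighted sum over the decimal string and a decimal-string comparison (objective: alternative).

-- ===== PORT A =====
-- A's while loop 'while x != 0: acc = acc*10 + x%10; x //= 10'.
-- Python diverges on x < 0 (excluded by Pre_adam); the guard 'x ≤ 0' agrees with 'x ≠ 0'
-- on every x ≥ 0 and only makes the recursion total.
def adamLoop (acc x : Int) : Int :=
  if h : x ≤ 0 then acc
  else adamLoop (acc * 10 + PySem.Int.mod x 10) (PySem.Int.floordiv x 10)
termination_by x.toNat
decreasing_by
  rw [PySem.Int.floordiv_of_nonneg (by norm_num)]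
  omega

def adam (n : Int) : Bool :=
  let n1 := adamLoop 0 n          -- first while loop: OG reverse
  let n2 := n
  let s1 := n2 ^ 2
  let s2 := n1 ^ 2
  let b := adamLoop 0 s2          -- second while loop: reverse of s2
  if b = s1 then true else false

-- ===== PORT B =====
-- r = sum((ord(c) - 48) * 10 ** i for i, c in enumerate(str(n))): the generator sum is a
-- fold over PySem.List.enumerate; the enumerate index is never negative, so '10 ** i' is 10 ^ i.toNat
-- exactly. Final check: str(r*r) == str(n*n)[::-1], with s[::-1] = PySem.Str.slice? s none
-- none (-1) (never none for step -1, hence getD).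
def adam_alt (n : Int) : Bool :=
  let s := PySem.Int.toStr n
  let r := (PySem.List.enumerate s.toList).foldl
    (fun acc ic => acc + ((ic.2.toNat : Int) - 48) * 10 ^ ic.1.toNat) 0
  decide (PySem.Int.toStr (r * r)
    = (PySem.Str.slice? (PySem.Int.toStr (n * n)) none none (-1)).getD "")

-- ===== PRECONDITION & SPEC =====
-- Pre_ excludes n < 0: there A's first while loop never terminates (n//10 stays -1).
def Pre_adam (n : Int) : Prop := 0 ≤ n
instance (n : Int) : Decidable (Pre_adam n) := by unfold Pre_adam; infer_instance
def pvWitness_adam : Int := 12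

def Spec_adam (n : Int) (out : Bool) : Prop := out = adam_alt n
instance (n : Int) (out : Bool) : Decidable (Spec_adam n out) := by unfold Spec_adam; infer_instance

-- ===== CLAIM (what is proved, stated in full; the proofs are below) =====
def Claim_equal_adam : Prop := ∀ (n : Int), Dom_adam n → Pre_adam n → Spec_adam n (adam n)

-- ===== LEMMAS AND PROOFS =====

-- decimal digit characters of m, most significant first (the value Nat.toDigits 10 computes)
def pvMsd (m : Nat) : List Char :=
  if m < 10 then [Nat.digitChar (m % 10)]
  else pvMsd (m / 10) ++ [Nat.digitChar (m % 10)]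

-- Horner value (over Nat) of a most-significant-first digit-character list
def pvVal (L : List Char) : Nat :=
  L.foldl (fun r c => 10 * r + (c.toNat - 48)) 0

theorem pvToDigitsCore_eq (fuel : Nat) : ∀ (n : Nat) (ds : List Char), n < fuel →
    Nat.toDigitsCore 10 fuel n ds = pvMsd n ++ ds := by
  induction fuel with
  | zero => intro n ds h; omega
  | succ f ih =>
    intro n ds h
    rw [Nat.toDigitsCore]
    by_cases hn : n < 10
    · simp only [Nat.div_eq_of_lt hn, reduceIte]
      rw [pvMsd, if_pos hn]; rfl
    · have hne : n / 10 ≠ 0 := by omega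
      rw [if_neg hne, ih (n / 10) _ (by omega)]
      conv_rhs => rw [pvMsd, if_neg hn]
      rw [List.append_assoc]
      rfl

theorem pvToDigits_eq (m : Nat) : Nat.toDigits 10 m = pvMsd m :=
  (pvToDigitsCore_eq (m + 1) m [] (Nat.lt_succ_self m)).trans (List.append_nil _)

theorem pvToChars_nonneg (x : Int) (hx : 0 ≤ x) :
    PySem.Int.toChars x = pvMsd x.toNat := by
  unfold PySem.Int.toChars
  rw [if_neg (by omega), pvToDigits_eq]

theorem pvDigitChar_toNat (d : Nat) (h : d < 10) : (Nat.digitChar d).toNat - 48 = d := by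
  interval_cases d <;> decide

theorem pvFoldl_mono (L : List Char) : ∀ acc : Nat,
    acc ≤ L.foldl (fun r c => 10 * r + (c.toNat - 48)) acc := by
  induction L with
  | nil => intro acc; simp
  | cons c t ih =>
    intro acc
    simp only [List.foldl_cons]
    exact le_trans (by omega : acc ≤ 10 * acc + (c.toNat - 48)) (ih _)

theorem pvVal_append (L : List Char) (c : Char) :
    pvVal (L ++ [c]) = 10 * pvVal L + (c.toNat - 48) := by
  unfold pvVal
  rw [List.foldl_append]
  rfl

-- Horner over pvMsd m (with any accumulator) recovers m
theorem pvVal_msd_acc (m : Nat) : ∀ acc : Nat,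
    (pvMsd m).foldl (fun r c => 10 * r + (c.toNat - 48)) acc
      = acc * 10 ^ (pvMsd m).length + m := by
  induction m using Nat.strong_induction_on with
  | _ m ih =>
    intro acc
    by_cases hlt : m < 10
    · rw [pvMsd, if_pos hlt]
      simp only [List.foldl_cons, List.foldl_nil, List.length_singleton]
      rw [pvDigitChar_toNat _ (Nat.mod_lt _ (by norm_num)), Nat.mod_eq_of_lt hlt]
      ring
    · rw [pvMsd, if_neg hlt]
      rw [List.foldl_append, List.length_append]
      simp only [List.foldl_cons, List.foldl_nil, List.length_singleton]
      rw [ih (m / 10) (by omega) acc, pvDigitChar_toNat _ (Nat.mod_lt _ (by norm_num))]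
      rw [pow_succ]
      have : 10 * (m / 10) + m % 10 = m := Nat.div_add_mod m 10
      ring_nf
      omega

theorem pvVal_msd (m : Nat) : pvVal (pvMsd m) = m := by
  have h := pvVal_msd_acc m 0
  unfold pvVal
  omega

theorem pvMsd_ne_nil (m : Nat) : pvMsd m ≠ [] := by
  rw [pvMsd]
  split <;> simp

theorem pvMsd_digits (m : Nat) : ∀ c ∈ pvMsd m, ∃ d, d < 10 ∧ c = Nat.digitChar d := by
  induction m using Nat.strong_induction_on with
  | _ m ih =>
    intro c hc
    by_cases hlt : m < 10
    · rw [pvMsd, if_pos hlt, List.mem_singleton] at hc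
      exact ⟨m % 10, Nat.mod_lt _ (by norm_num), hc⟩
    · rw [pvMsd, if_neg hlt, List.mem_append, List.mem_singleton] at hc
      rcases hc with hc | hc
      · exact ih (m / 10) (by omega) c hc
      · exact ⟨m % 10, Nat.mod_lt _ (by norm_num), hc⟩

theorem pvMsd_getLast? (m : Nat) :
    (pvMsd m).getLast? = some (Nat.digitChar (m % 10)) := by
  rw [pvMsd]
  split
  · rfl
  · exact List.getLast?_concat

theorem pvMsd_head? (m : Nat) (hm : 1 ≤ m) :
    ∃ d, 1 ≤ d ∧ d < 10 ∧ (pvMsd m).head? = some (Nat.digitChar d) := by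
  induction m using Nat.strong_induction_on with
  | _ m ih =>
    by_cases hlt : m < 10
    · exact ⟨m % 10, by omega, Nat.mod_lt _ (by norm_num), by rw [pvMsd, if_pos hlt]; rfl⟩
    · obtain ⟨d, h1, h2, h3⟩ := ih (m / 10) (by omega) (by omega)
      refine ⟨d, h1, h2, ?_⟩
      rw [pvMsd, if_neg hlt, List.head?_append_of_ne_nil _ (pvMsd_ne_nil _)]
      exact h3

-- pvMsd is a left inverse of pvVal on digit lists with a nonzero leading digit
theorem pvMsd_val (L : List Char)
    (hdig : ∀ c ∈ L, ∃ d, d < 10 ∧ c = Nat.digitChar d)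
    (hhead : ∃ d, 1 ≤ d ∧ d < 10 ∧ L.head? = some (Nat.digitChar d)) :
    pvMsd (pvVal L) = L := by
  induction L using List.reverseRecOn with
  | nil => obtain ⟨d, _, _, h⟩ := hhead; simp at h
  | append_singleton L' c ih =>
    obtain ⟨d, hd10, hcd⟩ := hdig c (by simp)
    rcases List.eq_nil_or_concat' L' with hnil | _
    · subst hnil
      obtain ⟨d0, hd01, hd010, hh⟩ := hhead
      simp only [List.nil_append, List.head?_cons] at hh
      have hc : c = Nat.digitChar d0 := by injection hh
      simp only [List.nil_append]
      have hv : pvVal [c] = d0 := by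
        unfold pvVal
        simp only [List.foldl_cons, List.foldl_nil]
        rw [hc, pvDigitChar_toNat _ hd010]
        omega
      rw [hv, pvMsd, if_pos (by omega), Nat.mod_eq_of_lt (by omega), hc]
    · have hL' : L' ≠ [] := by rintro rfl; simp_all
      have hhead' : ∃ d, 1 ≤ d ∧ d < 10 ∧ L'.head? = some (Nat.digitChar d) := by
        obtain ⟨d0, h1, h2, h3⟩ := hhead
        rw [List.head?_append_of_ne_nil _ hL'] at h3
        exact ⟨d0, h1, h2, h3⟩
      have hdig' : ∀ x ∈ L', ∃ d, d < 10 ∧ x = Nat.digitChar d := fun x hx =>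
        hdig x (List.mem_append_left _ hx)
      have hv1 : 1 ≤ pvVal L' := by
        obtain ⟨c0, t, rfl⟩ := List.exists_cons_of_ne_nil hL'
        obtain ⟨d0, h1, h2, h3⟩ := hhead'
        simp only [List.head?_cons] at h3
        have hc0 : c0 = Nat.digitChar d0 := by injection h3
        unfold pvVal
        simp only [List.foldl_cons]
        calc 1 ≤ 10 * 0 + (c0.toNat - 48) := by
                  rw [hc0, pvDigitChar_toNat _ h2]; omega
          _ ≤ _ := pvFoldl_mono t _
      rw [pvVal_append, hcd, pvDigitChar_toNat _ hd10]
      rw [pvMsd, if_neg (by omega)]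
      have hdiv : (10 * pvVal L' + d) / 10 = pvVal L' := by omega
      have hmod : (10 * pvVal L' + d) % 10 = d := by omega
      rw [hdiv, hmod, ih hdig' hhead', ← hcd]

-- A's loop on a nonnegative cast computes the Horner value of the reversed digit list
theorem pvAdamLoop_eq (m : Nat) (hm : 1 ≤ m) : ∀ acc : Nat,
    adamLoop (acc : Int) (m : Int)
      = ((pvMsd m).reverse.foldl (fun r c => 10 * r + (c.toNat - 48)) acc : Nat) := by
  induction m using Nat.strong_induction_on with
  | _ m ih =>
    intro acc
    rw [adamLoop, dif_neg (by exact_mod_cast by omega)]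
    have hmod : PySem.Int.mod (m : Int) 10 = ((m % 10 : Nat) : Int) := by
      exact_mod_cast PySem.Int.mod_natCast m 10
    have hdiv : PySem.Int.floordiv (m : Int) 10 = ((m / 10 : Nat) : Int) := by
      exact_mod_cast PySem.Int.floordiv_natCast m 10
    by_cases hlt : m < 10
    · rw [pvMsd, if_pos hlt]
      simp only [List.reverse_singleton, List.foldl_cons, List.foldl_nil]
      rw [pvDigitChar_toNat _ (Nat.mod_lt _ (by norm_num)), hmod, hdiv,
        Nat.div_eq_of_lt hlt, Nat.mod_eq_of_lt hlt]
      rw [adamLoop, dif_pos (by norm_num)]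
      push_cast
      ring
    · rw [pvMsd, if_neg hlt]
      simp only [List.reverse_append, List.reverse_singleton, List.singleton_append,
        List.foldl_cons]
      rw [pvDigitChar_toNat _ (Nat.mod_lt _ (by norm_num)), hmod, hdiv]
      have : ((acc * 10 + m % 10 : Nat) : Int) = (acc : Int) * 10 + ((m % 10 : Nat) : Int) := by
        push_cast; ring
      rw [← this, ih (m / 10) (by omega) (by omega) (acc * 10 + m % 10)]
      congr 2
      omega

-- The reversed Horner value ends in the leading digit
theorem pvVal_reverse_mod (m : Nat) (hm : 1 ≤ m) : pvVal (pvMsd m).reverse % 10 ≠ 0 := by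
  obtain ⟨d, hd1, hd10, hh⟩ := pvMsd_head? m hm
  obtain ⟨c, t, hct⟩ := List.exists_cons_of_ne_nil (pvMsd_ne_nil m)
  rw [hct] at hh
  simp only [List.head?_cons] at hh
  have hc : c = Nat.digitChar d := by injection hh
  rw [hct, List.reverse_cons, pvVal_append, hc, pvDigitChar_toNat _ hd10]
  omega

-- B's enumerate sum is the Horner value of the reversed digit list
theorem pvIntFold_append (M : List Char) (b : Int) (c : Char) :
    (M ++ [c]).foldl (fun r c => 10 * r + ((c.toNat : Int) - 48)) b
      = 10 * (M.foldl (fun r c => 10 * r + ((c.toNat : Int) - 48)) b) + ((c.toNat : Int) - 48) := by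
  rw [List.foldl_append]
  rfl

theorem pvEnumSum (L : List Char) : ∀ (j : Nat) (acc : Int),
    (PySem.List.enumerate L (j : Int)).foldl
        (fun a ic => a + ((ic.2.toNat : Int) - 48) * 10 ^ ic.1.toNat) acc
      = acc + 10 ^ j * (L.reverse.foldl (fun r c => 10 * r + ((c.toNat : Int) - 48)) 0) := by
  induction L with
  | nil => intro j acc; simp [PySem.List.enumerate]
  | cons c t ih =>
    intro j acc
    rw [PySem.List.enumerate_cons]
    simp only [List.foldl_cons]
    have h1 : ((j : Int) + 1) = ((j + 1 : Nat) : Int) := by push_cast; ring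
    rw [h1, ih (j + 1)]
    simp only [List.reverse_cons]
    rw [pvIntFold_append]
    have hidx : (((j : Int), c).1).toNat = j := by simp
    rw [hidx]
    ring

-- Int Horner fold over a digit list is the cast of the Nat Horner fold
theorem pvFold_cast (L : List Char)
    (hdig : ∀ c ∈ L, ∃ d, d < 10 ∧ c = Nat.digitChar d) : ∀ acc : Nat,
    L.foldl (fun r c => 10 * r + ((c.toNat : Int) - 48)) (acc : Int)
      = ((L.foldl (fun r c => 10 * r + (c.toNat - 48)) acc : Nat) : Int) := by
  induction L with
  | nil => intro acc; simp
  | cons c t ih =>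
    intro acc
    obtain ⟨d, hd10, hcd⟩ := hdig c (by simp)
    have h48 : 48 ≤ c.toNat := by
      rw [hcd]; interval_cases d <;> decide
    simp only [List.foldl_cons]
    have : 10 * (acc : Int) + ((c.toNat : Int) - 48) = ((10 * acc + (c.toNat - 48) : Nat) : Int) := by
      push_cast [h48]; ring
    rw [this, ih (fun x hx => hdig x (List.mem_cons_of_mem _ hx))]

-- ===== VERDICT (by name: the statement is the Claim_ definition above) =====
theorem adam_spec : Claim_equal_adam := by
  intro n _ hn
  have hn0 : (0 : Int) ≤ n := hn
  unfold Spec_adam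
  by_cases h0 : n = 0
  · subst h0
    have hl : adamLoop 0 0 = 0 := by rw [adamLoop]; norm_num
    have hA0 : adam 0 = true := by
      unfold adam
      show (if adamLoop 0 ((adamLoop 0 0) ^ 2) = (0 : Int) ^ 2 then true else false) = true
      rw [hl]
      norm_num [hl]
    rw [hA0]
    decide
  · -- n ≥ 1
    have hn1 : 1 ≤ n := by omega
    set m := n.toNat with hm
    have hmn : (m : Int) = n := Int.toNat_of_nonneg hn0
    have hm1 : 1 ≤ m := by omega
    have hdigrev : ∀ k : Nat, ∀ c ∈ (pvMsd k).reverse, ∃ d, d < 10 ∧ c = Nat.digitChar d :=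
      fun k c hc => pvMsd_digits k c (List.mem_reverse.mp hc)
    set rN := pvVal (pvMsd m).reverse with hrN
    -- A's n1 in Nat form
    have hA_r : adamLoop 0 n = (rN : Int) := by
      have h := pvAdamLoop_eq m hm1 0
      simp only [Nat.cast_zero] at h
      rw [← hmn, h, hrN]
      rfl
    -- B's r in Nat form
    have hB_r : (PySem.List.enumerate (PySem.Int.toStr n).toList).foldl
        (fun acc ic => acc + ((ic.2.toNat : Int) - 48) * 10 ^ ic.1.toNat) 0 = (rN : Int) := by
      rw [PySem.Int.toList_toStr, ← hmn, pvToChars_nonneg _ (by positivity), Int.toNat_natCast]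
      have h := pvEnumSum (pvMsd m) 0 0
      simp only [Nat.cast_zero, pow_zero, one_mul, zero_add] at h
      have h2 := pvFold_cast (pvMsd m).reverse (hdigrev m) 0
      simp only [Nat.cast_zero] at h2
      rw [h, h2, hrN]
      rfl
    -- rN ends in a nonzero digit, hence so does rN * rN
    have hr10 : rN % 10 ≠ 0 := pvVal_reverse_mod m hm1
    have hs2_10 : (rN * rN) % 10 ≠ 0 := by
      intro h
      have h10 : (10 : Nat) ∣ rN * rN := Nat.dvd_of_mod_eq_zero h
      have h2 : (2 : Nat) ∣ rN := (Nat.prime_two.dvd_mul.mp (dvd_trans (by norm_num) h10)).elim id id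
      have h5 : (5 : Nat) ∣ rN :=
        ((by norm_num : Nat.Prime 5).dvd_mul.mp (dvd_trans (by norm_num) h10)).elim id id
      have : (10 : Nat) ∣ rN := Nat.Coprime.mul_dvd_of_dvd_of_dvd (by norm_num) h2 h5
      omega
    set s2N := rN * rN with hs2N
    have hs2_1 : 1 ≤ s2N := by
      rcases Nat.eq_zero_or_pos s2N with h | h
      · rw [h] at hs2_10; simp at hs2_10
      · exact h
    set s1N := m * m with hs1N
    -- A's condition in Nat form
    have hA : adam n = decide (pvVal (pvMsd s2N).reverse = s1N) := by
      unfold adam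
      show (if adamLoop 0 ((adamLoop 0 n) ^ 2) = n ^ 2 then true else false)
        = decide (pvVal (pvMsd s2N).reverse = s1N)
      rw [hA_r]
      have hsq : ((rN : Int)) ^ 2 = ((s2N : Nat) : Int) := by rw [hs2N]; push_cast; ring
      have hn2 : n ^ 2 = ((s1N : Nat) : Int) := by rw [← hmn, hs1N]; push_cast; ring
      rw [hsq, hn2]
      have hloop := pvAdamLoop_eq s2N hs2_1 0
      simp only [Nat.cast_zero] at hloop
      rw [hloop]
      by_cases h : pvVal (pvMsd s2N).reverse = s1N
      · rw [if_pos (by unfold pvVal at h; exact_mod_cast h)]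
        simp [h]
      · rw [if_neg (by unfold pvVal at h; intro hc; exact h (by exact_mod_cast hc))]
        simp [h]
    -- B's condition in Nat form
    have hB : adam_alt n = decide (pvMsd s2N = (pvMsd s1N).reverse) := by
      unfold adam_alt
      simp only [hB_r]
      rw [PySem.Str.slice?_none_none_neg_one, Option.getD_some]
      have hrr : (rN : Int) * (rN : Int) = ((s2N : Nat) : Int) := by rw [hs2N]; push_cast; ring
      have hnn : n * n = ((s1N : Nat) : Int) := by rw [← hmn, hs1N]; push_cast; ring
      rw [hrr, hnn]
      have hposs2 : (0 : Int) ≤ ((s2N : Nat) : Int) := by positivity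
      have hposs1 : (0 : Int) ≤ ((s1N : Nat) : Int) := by positivity
      have hiff : (PySem.Int.toStr ((s2N : Nat) : Int)
            = String.ofList (PySem.Int.toStr ((s1N : Nat) : Int)).toList.reverse)
          ↔ (pvMsd s2N = (pvMsd s1N).reverse) := by
        constructor
        · intro he
          have := congrArg String.toList he
          rwa [String.toList_ofList, PySem.Int.toList_toStr, PySem.Int.toList_toStr,
            pvToChars_nonneg _ hposs2, pvToChars_nonneg _ hposs1,
            Int.toNat_natCast, Int.toNat_natCast] at this
        · intro h
          apply String.toList_inj.mp
          rw [String.toList_ofList, PySem.Int.toList_toStr, PySem.Int.toList_toStr,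
            pvToChars_nonneg _ hposs2, pvToChars_nonneg _ hposs1,
            Int.toNat_natCast, Int.toNat_natCast]
          exact h
      exact decide_eq_decide.mpr hiff
    -- the two conditions are equivalent
    rw [hA, hB]
    apply decide_eq_decide.mpr
    constructor
    · intro h
      have hmsd : pvMsd s1N = (pvMsd s2N).reverse := by
        rw [← h]
        apply pvMsd_val _ (hdigrev s2N)
        have hhead : ((pvMsd s2N).reverse).head? = some (Nat.digitChar (s2N % 10)) := by
          rw [List.head?_reverse]; exact pvMsd_getLast? s2N
        exact ⟨s2N % 10, by omega, Nat.mod_lt _ (by norm_num), hhead⟩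
      rw [hmsd, List.reverse_reverse]
    · intro h
      rw [h]
      have hv : pvVal ((pvMsd s1N).reverse).reverse = s1N := by
        rw [List.reverse_reverse]; exact pvVal_msd s1N
      simpa using hv
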